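-- pv_equiv track=rewrite | github.com/tsuru7/algorithm-study | AtCoder/ABC/201-300/ABC241/C.py | check_naname
-- ===== SOURCE A (Python) =====
-- def check_naname(smap):
--     n = len(smap)
--     for row in range(n-6):
--         cumsum = [0]*(n-row+1)
--         cumsum[0] = 0
--         for col in range(1, n-row+1):
--             cumsum[col] = cumsum[col-1] + ( 1 if smap[row+col-1][col-1] == '#' else 0 )
--         left = 0
--         right = 6
--         while right <= n-row:
--             if cumsum[right] - cumsum[left] >= 4:
--                 return True
--             left += 1
--             right += 1
--
--     return False
-- ===== SOURCE B (Python) =====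
-- def check_naname(smap):
--     n = len(smap)
--     for row in range(n - 6):
--         for s in range(n - row - 5):
--             if sum(1 for i in range(s, s + 6) if smap[row + i][i] == '#') >= 4:
--                 return True
--     return False
-- ===== Notes on version B (the rewrite author's own statement) =====
-- stated objective: simpler
-- what changed: Replaces the per-row prefix-sum table and sliding window subtraction with a direct recount of each length-6 window on the diagonal.
import Mathlib
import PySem

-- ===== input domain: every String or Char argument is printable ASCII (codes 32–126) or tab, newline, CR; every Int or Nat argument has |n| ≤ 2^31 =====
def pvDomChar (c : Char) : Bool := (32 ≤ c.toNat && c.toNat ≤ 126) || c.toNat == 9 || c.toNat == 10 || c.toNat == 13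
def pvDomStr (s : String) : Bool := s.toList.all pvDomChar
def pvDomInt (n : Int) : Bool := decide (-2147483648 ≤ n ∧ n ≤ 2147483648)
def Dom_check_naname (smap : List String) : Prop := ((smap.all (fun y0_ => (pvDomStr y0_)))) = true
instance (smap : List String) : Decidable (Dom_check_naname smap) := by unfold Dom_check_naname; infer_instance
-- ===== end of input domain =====

-- B replaces A's per-row prefix-sum table and sliding subtraction with a direct
-- recount of each length-6 diagonal window (simpler; same asymptotic cost).


-- ===== PORT A =====
-- shared cell accessor: smap[j][i] == '#'  (all indices are nonnegative; Pre_ keeps them in range)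
def pvCell (smap : List String) (j i : Nat) : Bool :=
  ((smap.getD j "").toList.getD i ' ') == '#'

-- cumsum = [0]*(n-row+1); for col in range(1, n-row+1): cumsum[col] = cumsum[col-1] + ind
def pvBuildCum (smap : List String) (row n : Nat) : List Int :=
  (List.range' 1 (n - row)).foldl
    (fun cs col =>
      cs.set col (cs.getD (col - 1) 0 + (if pvCell smap (row + col - 1) (col - 1) then 1 else 0)))
    (List.replicate (n - row + 1) (0 : Int))

-- while right <= n-row: if cumsum[right]-cumsum[left] >= 4: return True; left += 1; right += 1
def pvSlideA (cum : List Int) (bound left : Nat) : Bool :=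
  if left + 6 ≤ bound then
    if 4 ≤ cum.getD (left + 6) 0 - cum.getD left 0 then true
    else pvSlideA cum bound (left + 1)
  else false
termination_by bound - left

-- for row in range(n-6): … with early return True
def pvRowsA (smap : List String) (n row : Nat) : Bool :=
  if row < n - 6 then
    if pvSlideA (pvBuildCum smap row n) (n - row) 0 then true
    else pvRowsA smap n (row + 1)
  else false
termination_by (n - 6) - row

def check_naname (smap : List String) : Bool :=
  pvRowsA smap smap.length 0

-- ===== PORT B =====
-- sum(1 for i in range(s, s+6) if smap[row+i][i] == '#')
def pvWinCount (smap : List String) (row s : Nat) : Nat :=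
  ((List.range' s 6).filter (fun i => pvCell smap (row + i) i)).length

-- for row in range(n-6): for s in range(n-row-5): …  with early return True
def pvRowsB (smap : List String) (n row : Nat) : Bool :=
  if row < n - 6 then
    if (List.range (n - row - 5)).any (fun s => 4 ≤ pvWinCount smap row s) then true
    else pvRowsB smap n (row + 1)
  else false
termination_by (n - 6) - row

def check_naname_alt (smap : List String) : Bool :=
  pvRowsB smap smap.length 0

-- ===== PRECONDITION & SPEC =====
-- Pre_ excludes exactly the inputs on which A raises IndexError: with at least 7 rows,
-- row 0's cumsum pass indexes smap[j][j] for every j, so A raises iff some row j is shorter than j+1.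
def Pre_check_naname (smap : List String) : Prop :=
  smap.length < 7 ∨ ∀ j, j < smap.length → j < (smap.getD j "").toList.length
instance (smap : List String) : Decidable (Pre_check_naname smap) := by
  unfold Pre_check_naname; infer_instance

def pvWitness_check_naname : List String :=
  ["#.#.###", "###....", ".######", "#######", "..#####", "#.#.#.#", "######."]

def Spec_check_naname (smap : List String) (out : Bool) : Prop := out = check_naname_alt smap
instance (smap : List String) (out : Bool) : Decidable (Spec_check_naname smap out) := by
  unfold Spec_check_naname; infer_instance

-- ===== CLAIM (what is proved, stated in full; the proofs are below) =====
def Claim_equal_check_naname : Prop := ∀ (smap : List String), Dom_check_naname smap → Pre_check_naname smap → Spec_check_naname smap (check_naname smap)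

-- ===== LEMMAS AND PROOFS =====

-- prefix count of '#' on the diagonal anchored at (row, 0)
def pvPref (smap : List String) (row c : Nat) : Int :=
  (((List.range c).filter (fun i => pvCell smap (row + i) i)).length : Int)

lemma pvPref_succ (smap : List String) (row c : Nat) :
    pvPref smap row (c + 1) =
      pvPref smap row c + (if pvCell smap (row + c) c then 1 else 0) := by
  simp only [pvPref, List.range_succ, List.filter_append, List.length_append, List.filter_cons,
    List.filter_nil]
  by_cases h : pvCell smap (row + c) c <;> simp [h]

lemma pvBuildCum_spec (smap : List String) (row n : Nat) :
    (pvBuildCum smap row n).length = n - row + 1 ∧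
      ∀ j, j ≤ n - row → (pvBuildCum smap row n).getD j 0 = pvPref smap row j := by
  set m := n - row with hm
  unfold pvBuildCum
  rw [← hm]
  -- generalized invariant over the fold prefix
  suffices H : ∀ k, k ≤ m →
      ((List.range' 1 k).foldl
        (fun cs col =>
          cs.set col (cs.getD (col - 1) 0 + (if pvCell smap (row + col - 1) (col - 1) then 1 else 0)))
        (List.replicate (m + 1) (0 : Int))).length = m + 1 ∧
      ∀ j, j ≤ m →
        ((List.range' 1 k).foldl
          (fun cs col =>
            cs.set col (cs.getD (col - 1) 0 + (if pvCell smap (row + col - 1) (col - 1) then 1 else 0)))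
          (List.replicate (m + 1) (0 : Int))).getD j 0 = if j ≤ k then pvPref smap row j else 0 by
    obtain ⟨h1, h2⟩ := H m le_rfl
    refine ⟨h1, fun j hj => ?_⟩
    rw [h2 j hj, if_pos hj]
  intro k hk
  induction k with
  | zero =>
    constructor
    · simp
    · intro j hj
      rcases Nat.eq_zero_or_pos j with h0 | h0
      · subst h0; simp [pvPref]
      · simp only [List.range'_zero, List.foldl_nil]
        rw [if_neg (by omega)]
        rw [List.getD_eq_getElem?_getD, List.getElem?_replicate]
        simp [Nat.lt_succ_of_le hj]
  | succ k ih =>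
    obtain ⟨ihl, ihv⟩ := ih (by omega)
    rw [List.range'_concat, List.foldl_append, List.foldl_cons, List.foldl_nil]
    simp only [show 1 + 1 * k = k + 1 from by omega, Nat.add_sub_cancel,
      show ∀ r : Nat, r + (k + 1) - 1 = r + k from fun r => by omega]
    constructor
    · rw [List.length_set, ihl]
    · intro j hj
      have hprev : _ = _ := ihv k (by omega)
      rw [if_pos (le_refl k)] at hprev
      rcases eq_or_ne (k + 1) j with hje | hje
      · subst hje
        rw [List.getD_eq_getElem?_getD, List.getElem?_set, ihl, if_pos rfl, if_pos (by omega)]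
        simp only [Option.getD_some]
        rw [hprev, if_pos (le_refl _), pvPref_succ]
      · rw [List.getD_eq_getElem?_getD, List.getElem?_set, if_neg hje,
          ← List.getD_eq_getElem?_getD, ihv j hj]
        rcases Nat.lt_or_ge j (k + 1) with hlt | hge
        · rw [if_pos (by omega), if_pos (by omega)]
        · rw [if_neg (by omega), if_neg (by omega)]

lemma pvPref_window (smap : List String) (row s : Nat) :
    pvPref smap row (s + 6) - pvPref smap row s = (pvWinCount smap row s : Int) := by
  have h : List.range (s + 6) = List.range s ++ List.range' s 6 := by
    rw [List.range_add, List.range'_eq_map_range]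
  simp only [pvPref, pvWinCount, h, List.filter_append, List.length_append]
  push_cast
  ring

lemma pvSlideA_iff (cum : List Int) (bound left : Nat) :
    pvSlideA cum bound left = true ↔
      ∃ s, left ≤ s ∧ s + 6 ≤ bound ∧ 4 ≤ cum.getD (s + 6) 0 - cum.getD s 0 := by
  induction h : bound - left generalizing left with
  | zero =>
    rw [pvSlideA]
    rw [if_neg (by omega)]
    simp only [Bool.false_eq_true, false_iff]
    rintro ⟨s, hs1, hs2, _⟩
    omega
  | succ k ih =>
    rw [pvSlideA]
    by_cases hb : left + 6 ≤ bound
    · rw [if_pos hb]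
      by_cases hc : 4 ≤ cum.getD (left + 6) 0 - cum.getD left 0
      · rw [if_pos hc]
        simp only [true_iff]
        exact ⟨left, le_refl _, hb, hc⟩
      · rw [if_neg hc, ih (left + 1) (by omega)]
        constructor
        · rintro ⟨s, h1, h2, h3⟩; exact ⟨s, by omega, h2, h3⟩
        · rintro ⟨s, h1, h2, h3⟩
          refine ⟨s, ?_, h2, h3⟩
          rcases Nat.eq_or_lt_of_le h1 with he | hl
          · exact absurd (he ▸ h3) hc
          · omega
    · rw [if_neg hb]
      simp only [Bool.false_eq_true, false_iff]
      rintro ⟨s, hs1, hs2, _⟩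
      omega

lemma pvRow_eq (smap : List String) (n row : Nat) :
    pvSlideA (pvBuildCum smap row n) (n - row) 0 =
      (List.range (n - row - 5)).any (fun s => 4 ≤ pvWinCount smap row s) := by
  obtain ⟨-, hval⟩ := pvBuildCum_spec smap row n
  rw [Bool.eq_iff_iff, pvSlideA_iff, List.any_eq_true]
  constructor
  · rintro ⟨s, -, hs2, hs3⟩
    refine ⟨s, List.mem_range.mpr (by omega), ?_⟩
    rw [hval (s + 6) (by omega), hval s (by omega), pvPref_window] at hs3
    simpa using (by exact_mod_cast hs3 : (4 : Int) ≤ (pvWinCount smap row s : Int))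
  · rintro ⟨s, hs, hc⟩
    have hs' : s + 6 ≤ n - row := by have := List.mem_range.mp hs; omega
    refine ⟨s, Nat.zero_le _, hs', ?_⟩
    rw [hval (s + 6) (by omega), hval s (by omega), pvPref_window]
    exact_mod_cast (by simpa using hc : 4 ≤ pvWinCount smap row s)

lemma pvRows_eq (smap : List String) (n row : Nat) :
    pvRowsA smap n row = pvRowsB smap n row := by
  induction h : (n - 6) - row generalizing row with
  | zero =>
    rw [pvRowsA, pvRowsB]
    rw [if_neg (by omega), if_neg (by omega)]
  | succ k ih =>
    rw [pvRowsA, pvRowsB]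
    by_cases hr : row < n - 6
    · rw [if_pos hr, if_pos hr, pvRow_eq smap n row, ih (row + 1) (by omega)]
    · rw [if_neg hr, if_neg hr]

-- ===== VERDICT (by name: the statement is the Claim_ definition above) =====
theorem check_naname_spec : Claim_equal_check_naname := by
  intro smap _ _
  unfold Spec_check_naname check_naname check_naname_alt
  exact pvRows_eq smap smap.length 0
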